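-- pv_equiv track=rewrite | github.com/hppRC/competitive-programming-solutions | AOJ/AOJ2660.py | calc
-- ===== SOURCE A (Python) =====
-- def calc(a, b):
--     c = 0
--     ret = 0
--     while (a or b or c):
--         x = a%10
--         y = b%10
--         ret += x*y + c
--         c = (x + y + c >= 10)
--         a //= 10
--         b //= 10
--     return ret
-- ===== SOURCE B (Python) =====
-- def calc(a, b):
--     def digitsum(n):
--         s = 0
--         while n:
--             s += n % 10
--             n //= 10
--         return s
--
--     prod = 0
--     x, y = a, b
--     while x and y:
--         prod += (x % 10) * (y % 10)
--         x //= 10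
--         y //= 10
--     return prod + (digitsum(a) + digitsum(b) - digitsum(a + b)) // 9
-- ===== Notes on version B (the rewrite author's own statement) =====
-- stated objective: alternative
-- what changed: Replaces A's sequential carry-chain simulation with two independent parts: a digit-product sum over zipped digits, plus a closed-form carry count via the identity carries = (digitsum(a)+digitsum(b)-digitsum(a+b))//9; Pre_ requires a,b >= 0 because both programs loop forever on negative inputs (// 10 stalls at -1).
import Mathlib
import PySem

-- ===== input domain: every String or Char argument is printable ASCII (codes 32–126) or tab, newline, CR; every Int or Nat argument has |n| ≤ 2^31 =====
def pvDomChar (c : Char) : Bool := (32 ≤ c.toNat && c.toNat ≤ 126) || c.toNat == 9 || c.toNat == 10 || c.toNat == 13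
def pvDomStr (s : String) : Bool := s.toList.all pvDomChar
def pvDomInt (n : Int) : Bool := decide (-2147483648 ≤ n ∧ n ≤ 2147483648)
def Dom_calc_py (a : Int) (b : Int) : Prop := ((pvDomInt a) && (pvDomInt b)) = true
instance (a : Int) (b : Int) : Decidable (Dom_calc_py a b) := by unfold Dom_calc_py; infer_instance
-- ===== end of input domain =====

-- B replaces A's sequential carry-chain simulation by a digit-product sum plus a
-- closed-form carry count (digitsum(a)+digitsum(b)-digitsum(a+b))//9: an alternative
-- decomposition of the same cost. Both loop forever on negative inputs, hence Pre_.


-- ===== PORT A =====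
-- Python's `while (a or b or c)` loop, made total with a fuel guard (the fuel is
-- generous: the claim is only about nonnegative inputs, where it never runs out).
-- Python's bool carry `c = (x + y + c >= 10)` is ported as the Int 1/0 it is used as.
def calcLoopA (fuel : Nat) (a b c ret : Int) : Int :=
  match fuel with
  | 0 => ret
  | f + 1 =>
    if a ≠ 0 ∨ b ≠ 0 ∨ c ≠ 0 then
      let x := PySem.Int.mod a 10
      let y := PySem.Int.mod b 10
      let ret' := ret + x * y + c
      let c' : Int := if x + y + c ≥ 10 then 1 else 0
      calcLoopA f (PySem.Int.floordiv a 10) (PySem.Int.floordiv b 10) c' ret'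
    else ret

def calc_py (a : Int) (b : Int) : Int :=
  calcLoopA (2 * a.natAbs + 2 * b.natAbs + 1) a b 0 0

-- ===== PORT B =====
-- digitsum's `while n` loop (fuel guard for totality, as above)
def dsLoopB (fuel : Nat) (n s : Int) : Int :=
  match fuel with
  | 0 => s
  | f + 1 =>
    if n ≠ 0 then dsLoopB f (PySem.Int.floordiv n 10) (s + PySem.Int.mod n 10)
    else s

def digitsumB (n : Int) : Int := dsLoopB (n.natAbs + 1) n 0

-- the `while x and y` product loop
def prodLoopB (fuel : Nat) (x y prod : Int) : Int :=
  match fuel with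
  | 0 => prod
  | f + 1 =>
    if x ≠ 0 ∧ y ≠ 0 then
      prodLoopB f (PySem.Int.floordiv x 10) (PySem.Int.floordiv y 10)
        (prod + PySem.Int.mod x 10 * PySem.Int.mod y 10)
    else prod

def calc_py_alt (a : Int) (b : Int) : Int :=
  prodLoopB (a.natAbs + 1) a b 0
    + PySem.Int.floordiv (digitsumB a + digitsumB b - digitsumB (a + b)) 9

-- ===== PRECONDITION & SPEC =====
-- Pre_ excludes negative inputs: there Python A (and B) never terminates (`a //= 10` stalls at -1).
def Pre_calc_py (a : Int) (b : Int) : Prop := 0 ≤ a ∧ 0 ≤ b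
instance (a : Int) (b : Int) : Decidable (Pre_calc_py a b) := by unfold Pre_calc_py; infer_instance
def pvWitness_calc_py : Int × Int := (95, 87)

def Spec_calc_py (a : Int) (b : Int) (out : Int) : Prop := out = calc_py_alt a b
instance (a : Int) (b : Int) (out : Int) : Decidable (Spec_calc_py a b out) := by unfold Spec_calc_py; infer_instance

-- ===== CLAIM (what is proved, stated in full; the proofs are below) =====
def Claim_equal_calc_py : Prop := ∀ (a : Int) (b : Int), Dom_calc_py a b → Pre_calc_py a b → Spec_calc_py a b (calc_py a b)

-- ===== LEMMAS AND PROOFS =====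

-- Nat-level models of the three loops (well-founded, no fuel)
def dsN (n : Nat) : Nat :=
  if n = 0 then 0 else n % 10 + dsN (n / 10)
decreasing_by exact Nat.div_lt_self (Nat.pos_of_ne_zero (by assumption)) (by omega)

def prodN (a b : Nat) : Nat :=
  if a = 0 ∨ b = 0 then 0 else a % 10 * (b % 10) + prodN (a / 10) (b / 10)
termination_by a + b
decreasing_by
  exact Nat.add_lt_add_of_lt_of_le
    (Nat.div_lt_self (by omega) (by omega)) (Nat.div_le_self _ _)

-- number of carries when adding a and b with incoming carry c
def carryN (a b c : Nat) : Nat :=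
  if a = 0 ∧ b = 0 then 0
  else
    let c' := if a % 10 + b % 10 + c ≥ 10 then 1 else 0
    c' + carryN (a / 10) (b / 10) c'
termination_by 2 * a + 2 * b + c
decreasing_by
  have hab : a ≠ 0 ∨ b ≠ 0 := by tauto
  have h1 := Nat.div_le_self a 10
  have h2 := Nat.div_le_self b 10
  rcases hab with h | h
  · have := Nat.div_lt_self (Nat.pos_of_ne_zero h) (by omega : 1 < 10)
    split <;> omega
  · have := Nat.div_lt_self (Nat.pos_of_ne_zero h) (by omega : 1 < 10)
    split <;> omega

theorem dsN_zero : dsN 0 = 0 := by rw [dsN]; simp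

theorem dsN_rec (n : Nat) (h : n ≠ 0) : dsN n = n % 10 + dsN (n / 10) := by
  rw [dsN]; simp [h]

theorem dsN_one : dsN 1 = 1 := by
  rw [dsN_rec 1 one_ne_zero]; simp [dsN_zero]

theorem prodN_zero_left (b : Nat) : prodN 0 b = 0 := by rw [prodN.eq_def]; simp

theorem prodN_zero_right (a : Nat) : prodN a 0 = 0 := by rw [prodN.eq_def]; simp

theorem prodN_rec (a b : Nat) :
    prodN a b = a % 10 * (b % 10) + prodN (a / 10) (b / 10) := by
  rw [prodN.eq_def]
  by_cases h : a = 0 ∨ b = 0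
  · rcases h with h | h <;> subst h <;>
      simp [prodN_zero_left, prodN_zero_right]
  · simp [h]

theorem carryN_zero (c : Nat) : carryN 0 0 c = 0 := by rw [carryN.eq_def]; simp

theorem carryN_rec (a b c : Nat) (hc : c ≤ 1) :
    carryN a b c = (if a % 10 + b % 10 + c ≥ 10 then 1 else 0)
      + carryN (a / 10) (b / 10) (if a % 10 + b % 10 + c ≥ 10 then 1 else 0) := by
  rw [carryN.eq_def]
  by_cases h : a = 0 ∧ b = 0
  · obtain ⟨h1, h2⟩ := h; subst h1; subst h2
    have hn : ¬ (0 % 10 + 0 % 10 + c ≥ 10) := by omega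
    simp [carryN_zero]
    omega
  · simp [h]

-- the carry identity: digitsum a + digitsum b + c = 9 * carries + digitsum (a+b+c)
theorem carry_identity : ∀ (m a b c : Nat), 2 * a + 2 * b + c ≤ m → c ≤ 1 →
    dsN a + dsN b + c = 9 * carryN a b c + dsN (a + b + c) := by
  intro m
  induction m with
  | zero =>
    intro a b c hm _hc
    have ha : a = 0 := by omega
    have hb : b = 0 := by omega
    have hcz : c = 0 := by omega
    subst ha; subst hb; subst hcz
    simp [dsN_zero, carryN_zero]
  | succ m ih =>
    intro a b c hm hc
    by_cases h0 : a = 0 ∧ b = 0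
    · obtain ⟨h1, h2⟩ := h0; subst h1; subst h2
      rw [carryN_zero]
      interval_cases c <;> simp [dsN_zero, dsN_one]
    · have hab : a ≠ 0 ∨ b ≠ 0 := by tauto
      have habc : a + b + c ≠ 0 := by omega
      rw [dsN_rec (a + b + c) habc, carryN_rec a b c hc]
      set c' : Nat := if a % 10 + b % 10 + c ≥ 10 then 1 else 0 with hc'
      have hc'le : c' ≤ 1 := by rw [hc']; split <;> omega
      have hdiv : (a + b + c) / 10 = a / 10 + b / 10 + c' := by
        rw [hc']; split <;> omega
      have hmeas : 2 * (a / 10) + 2 * (b / 10) + c' ≤ m := by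
        have ha10 := Nat.div_le_self a 10
        have hb10 := Nat.div_le_self b 10
        have : a / 10 + b / 10 < a + b := by
          rcases hab with h | h
          · have := Nat.div_lt_self (Nat.pos_of_ne_zero h) (by omega : 1 < 10); omega
          · have := Nat.div_lt_self (Nat.pos_of_ne_zero h) (by omega : 1 < 10); omega
        omega
      have IH := ih (a / 10) (b / 10) c' hmeas hc'le
      rw [hdiv]
      have hmod : (a + b + c) % 10 + 10 * c' = a % 10 + b % 10 + c := by
        rw [hc']; split <;> omega
      rcases Nat.eq_zero_or_pos a with h1 | h1
      · subst h1
        rw [dsN_rec b (by tauto)] at *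
        simp only [Nat.zero_div, dsN_zero] at IH ⊢
        omega
      · rw [dsN_rec a (by omega)]
        rcases Nat.eq_zero_or_pos b with h2 | h2
        · subst h2
          simp only [Nat.zero_div, dsN_zero] at IH ⊢
          omega
        · rw [dsN_rec b (by omega)]
          omega

-- casts
theorem mod10_cast (n : Nat) : PySem.Int.mod (n : Int) 10 = ((n % 10 : Nat) : Int) := by
  exact_mod_cast PySem.Int.mod_natCast n 10

theorem div10_cast (n : Nat) : PySem.Int.floordiv (n : Int) 10 = ((n / 10 : Nat) : Int) := by
  exact_mod_cast PySem.Int.floordiv_natCast n 10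

-- the A loop computes prodN + incoming carry + carryN
theorem calcLoopA_eq : ∀ (fuel : Nat) (a b c : Nat) (ret : Int), c ≤ 1 →
    2 * a + 2 * b + c + 1 ≤ fuel →
    calcLoopA fuel (a : Int) (b : Int) (c : Int) ret
      = ret + (prodN a b : Int) + (c : Int) + (carryN a b c : Int) := by
  intro fuel
  induction fuel with
  | zero => intro a b c ret hc hf; omega
  | succ f ih =>
    intro a b c ret hc hf
    rw [calcLoopA]
    by_cases h0 : a = 0 ∧ b = 0 ∧ c = 0
    · obtain ⟨h1, h2, h3⟩ := h0; subst h1; subst h2; subst h3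
      have hcond : ¬ (((0:Nat) : Int) ≠ 0 ∨ ((0:Nat) : Int) ≠ 0 ∨ ((0:Nat) : Int) ≠ 0) := by
        simp
      rw [if_neg hcond]
      simp [prodN_zero_left, carryN_zero]
    · have hcond : (a : Int) ≠ 0 ∨ (b : Int) ≠ 0 ∨ (c : Int) ≠ 0 := by
        simp only [ne_eq, Nat.cast_eq_zero]; tauto
      rw [if_pos hcond]
      simp only [mod10_cast, div10_cast]
      set c' : Nat := if a % 10 + b % 10 + c ≥ 10 then 1 else 0 with hc'
      have hcc : (if ((a % 10 : Nat) : Int) + ((b % 10 : Nat) : Int) + (c : Int) ≥ 10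
          then (1 : Int) else 0) = (c' : Int) := by
        rw [hc']
        by_cases hge : a % 10 + b % 10 + c ≥ 10
        · rw [if_pos hge, if_pos (by push_cast; omega)]; norm_num
        · rw [if_neg hge, if_neg (by push_cast; omega)]; norm_num
      rw [hcc]
      have hc'le : c' ≤ 1 := by rw [hc']; split <;> omega
      have hmeas : 2 * (a / 10) + 2 * (b / 10) + c' + 1 ≤ f := by
        have ha10 := Nat.div_le_self a 10
        have hb10 := Nat.div_le_self b 10
        have hz : a ≠ 0 ∨ b ≠ 0 ∨ c ≠ 0 := by tauto
        rcases hz with h | h | h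
        · have := Nat.div_lt_self (Nat.pos_of_ne_zero h) (by omega : 1 < 10)
          have : c' ≤ 1 := hc'le
          omega
        · have := Nat.div_lt_self (Nat.pos_of_ne_zero h) (by omega : 1 < 10)
          have : c' ≤ 1 := hc'le
          omega
        · rcases Nat.eq_zero_or_pos a with h1 | h1
          · rcases Nat.eq_zero_or_pos b with h2 | h2
            · have hc'0 : c' = 0 := by
                rw [hc']
                split <;> omega
              omega
            · have := Nat.div_lt_self h2 (by omega : 1 < 10)
              have := Nat.div_le_self a 10
              omega
          · have := Nat.div_lt_self h1 (by omega : 1 < 10)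
            have := Nat.div_le_self b 10
            omega
      rw [ih (a / 10) (b / 10) c' _ hc'le hmeas]
      rw [prodN_rec a b, carryN_rec a b c hc, ← hc']
      push_cast
      ring

-- the B digitsum loop computes dsN
theorem dsLoopB_eq : ∀ (fuel : Nat) (n : Nat) (s : Int), n + 1 ≤ fuel →
    dsLoopB fuel (n : Int) s = s + (dsN n : Int) := by
  intro fuel
  induction fuel with
  | zero => intro n s hf; omega
  | succ f ih =>
    intro n s hf
    rw [dsLoopB]
    rcases Nat.eq_zero_or_pos n with h | h
    · subst h
      rw [if_neg (by simp)]
      simp [dsN_zero]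
    · have hne : (n : Int) ≠ 0 := by exact_mod_cast Nat.pos_iff_ne_zero.mp h
      rw [if_pos hne]
      simp only [mod10_cast, div10_cast]
      have hlt := Nat.div_lt_self h (by omega : 1 < 10)
      rw [ih (n / 10) _ (by omega)]
      rw [dsN_rec n (by omega)]
      push_cast
      ring

-- the B product loop computes prodN
theorem prodLoopB_eq : ∀ (fuel : Nat) (a b : Nat) (p : Int), a + 1 ≤ fuel →
    prodLoopB fuel (a : Int) (b : Int) p = p + (prodN a b : Int) := by
  intro fuel
  induction fuel with
  | zero => intro a b p hf; omega
  | succ f ih =>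
    intro a b p hf
    rw [prodLoopB]
    by_cases h0 : a = 0 ∨ b = 0
    · have hcond : ¬ ((a : Int) ≠ 0 ∧ (b : Int) ≠ 0) := by
        simp only [ne_eq, Nat.cast_eq_zero]; tauto
      rw [if_neg hcond]
      rcases h0 with h | h <;> subst h <;>
        simp [prodN_zero_left, prodN_zero_right]
    · have ha : a ≠ 0 := by tauto
      have hb : b ≠ 0 := by tauto
      have hcond : (a : Int) ≠ 0 ∧ (b : Int) ≠ 0 := by
        constructor <;> simp only [ne_eq, Nat.cast_eq_zero] <;> assumption
      rw [if_pos hcond]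
      simp only [mod10_cast, div10_cast]
      have hlt := Nat.div_lt_self (Nat.pos_of_ne_zero ha) (by omega : 1 < 10)
      rw [ih (a / 10) (b / 10) _ (by omega)]
      rw [prodN_rec a b]
      push_cast
      ring

theorem floordiv_nine_mul (k : Nat) :
    PySem.Int.floordiv ((9 * k : Nat) : Int) 9 = (k : Int) := by
  have h : (9 * k) / 9 = k := by omega
  calc PySem.Int.floordiv ((9 * k : Nat) : Int) 9
      = (((9 * k) / 9 : Nat) : Int) := by
        exact_mod_cast PySem.Int.floordiv_natCast (9 * k) 9
    _ = (k : Int) := by rw [h]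

-- ===== VERDICT (by name: the statement is the Claim_ definition above) =====
theorem calc_py_spec : Claim_equal_calc_py := by
  intro a b _hdom hpre
  obtain ⟨ha, hb⟩ := hpre
  obtain ⟨a', rfl⟩ : ∃ a' : Nat, a = (a' : Int) := ⟨a.toNat, (Int.toNat_of_nonneg ha).symm⟩
  obtain ⟨b', rfl⟩ : ∃ b' : Nat, b = (b' : Int) := ⟨b.toNat, (Int.toNat_of_nonneg hb).symm⟩
  unfold Spec_calc_py calc_py calc_py_alt digitsumB
  have hA := calcLoopA_eq (2 * (a' : Int).natAbs + 2 * (b' : Int).natAbs + 1) a' b' 0 0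
    (by omega) (by simp)
  simp only [Nat.cast_zero] at hA
  rw [hA]
  have habs : ((a' : Int) + (b' : Int)).natAbs = a' + b' := by
    rw [← Nat.cast_add]; exact Int.natAbs_natCast _
  have hds_ab : dsLoopB (((a' : Int) + (b' : Int)).natAbs + 1) ((a' : Int) + (b' : Int)) 0
      = (0 : Int) + (dsN (a' + b') : Int) := by
    rw [habs, ← Nat.cast_add]
    exact dsLoopB_eq (a' + b' + 1) (a' + b') 0 (by omega)
  rw [hds_ab,
    dsLoopB_eq ((a' : Int).natAbs + 1) a' 0 (by simp),
    dsLoopB_eq ((b' : Int).natAbs + 1) b' 0 (by simp),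
    prodLoopB_eq ((a' : Int).natAbs + 1) a' b' 0 (by simp)]
  have hid := carry_identity (2 * a' + 2 * b') a' b' 0 (by omega) (by omega)
  simp only [Nat.add_zero] at hid
  have hdiff : (0 : Int) + (dsN a' : Int) + ((0 : Int) + (dsN b' : Int))
      - ((0 : Int) + (dsN (a' + b') : Int)) = ((9 * carryN a' b' 0 : Nat) : Int) := by
    push_cast
    omega
  rw [hdiff, floordiv_nine_mul]
  ring
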